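-- pv_equiv track=rewrite | github.com/dbsprout/dbsprout | dbsprout/schema/graph.py | _compute_insertion_order
-- ===== SOURCE A (Python) =====
-- from graphlib import CycleError, TopologicalSorter
--
-- def _compute_insertion_order(
--     deps: dict[str, frozenset[str]],
-- ) -> tuple[tuple[str, ...], ...]:
--     """Run topological sort and return batched insertion order.
--
--     Each batch is a tuple of table names sorted alphabetically
--     for deterministic output.
--     """
--     sorter: TopologicalSorter[str] = TopologicalSorter(deps)
--     sorter.prepare()
--
--     batches: list[tuple[str, ...]] = []
--     while sorter.is_active():
--         ready = sorter.get_ready()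
--         batch = tuple(sorted(ready))
--         batches.append(batch)
--         sorter.done(*batch)
--
--     return tuple(batches)
-- ===== SOURCE B (Python) =====
-- class CycleError(ValueError):
--     """Raised when the dependency graph contains a cycle (mirrors graphlib)."""
--
--
-- def _compute_insertion_order(
--     deps: dict[str, frozenset[str]],
-- ) -> tuple[tuple[str, ...], ...]:
--     """Batched topological order by repeated filtering.
--
--     A node is ready as soon as none of its dependencies is still
--     pending; each round emits every ready node at once, sorted
--     alphabetically, without maintaining in-degree counters.
--     """
--     remaining = set(deps)
--     for preds in deps.values():
--         remaining |= preds
--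
--     batches: list[tuple[str, ...]] = []
--     while remaining:
--         front = sorted(
--             n for n in remaining
--             if remaining.isdisjoint(deps.get(n, frozenset()))
--         )
--         if not front:
--             raise CycleError("nodes are in a cycle", sorted(remaining))
--         batches.append(tuple(front))
--         remaining.difference_update(front)
--     return tuple(batches)
-- ===== Notes on version B (the rewrite author's own statement) =====
-- stated objective: alternative
-- what changed: Replaces graphlib.TopologicalSorter's in-degree-counter/successor-list state machine by a hand-rolled loop that repeatedly filters the set of still-pending tables for those whose dependencies are all done, emitting each sorted frontier as a batch.
import Mathlib
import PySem

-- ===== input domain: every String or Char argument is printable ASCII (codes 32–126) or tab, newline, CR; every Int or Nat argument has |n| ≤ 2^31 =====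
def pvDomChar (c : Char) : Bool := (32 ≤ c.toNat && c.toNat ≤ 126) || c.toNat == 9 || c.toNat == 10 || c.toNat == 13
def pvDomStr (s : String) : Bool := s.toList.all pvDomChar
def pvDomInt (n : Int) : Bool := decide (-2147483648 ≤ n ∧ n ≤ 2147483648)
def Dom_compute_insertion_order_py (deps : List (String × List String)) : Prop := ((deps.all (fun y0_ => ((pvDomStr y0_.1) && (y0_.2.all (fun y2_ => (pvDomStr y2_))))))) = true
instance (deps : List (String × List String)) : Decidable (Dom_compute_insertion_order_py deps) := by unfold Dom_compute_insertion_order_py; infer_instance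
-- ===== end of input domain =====

-- B replaces graphlib's in-degree-counter/successor-list state machine by repeated
-- filtering of the set of still-pending nodes (alternative algorithm, similar cost).

-- ===== PORT A =====
-- the Python dict[str, frozenset[str]] argument: insertion-ordered dict, dedup'd values
def pvGraph (deps : List (String × List String)) : PySem.Dict String (List String) :=
  deps.foldl (fun d p => d.insert p.1 (PySem.List.dedup p.2)) PySem.Dict.empty

-- graphlib TopologicalSorter.add(node, *predecessors): npredecessors += len, append to
-- each predecessor's successor list (error-flag bookkeeping A never observes is elided)
def pvAddA (d : PySem.Dict String (Int × List String)) (node : String)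
    (preds : List String) : PySem.Dict String (Int × List String) :=
  let d1 := d.modify node ((0:Int), ([]:List String)) (fun i => (i.1 + (preds.length : Int), i.2))
  preds.foldl (fun d2 p => d2.modify p ((0:Int), ([]:List String)) (fun i => (i.1, i.2 ++ [node]))) d1

-- TopologicalSorter(deps): add every (node, predecessors) item
def pvBuildA (g : PySem.Dict String (List String)) : PySem.Dict String (Int × List String) :=
  g.items.foldl (fun d kv => pvAddA d kv.1 kv.2) PySem.Dict.empty

-- sorter.done(n): decrement each successor's count, newly-zero nodes become ready
def pvDone1 (st : PySem.Dict String (Int × List String) × List String) (n : String) :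
    PySem.Dict String (Int × List String) × List String :=
  ((st.1.getD n ((0:Int), [])).2).foldl (fun st2 s =>
    let d := st2.1.modify s ((0:Int), ([]:List String)) (fun i => (i.1 - 1, i.2))
    if (d.getD s ((0:Int), [])).1 = 0 then (d, st2.2 ++ [s]) else (d, st2.2)) st

-- A's while sorter.is_active() loop: get_ready, sort, append, done(*batch)
def pvRoundsA : Nat → PySem.Dict String (Int × List String) → List String →
    List (List String) → List (List String)
  | 0, _, _, batches => batches
  | fuel+1, d, ready, batches =>
    if ready.isEmpty then batches
    else
      let batch := PySem.List.sorted ready (fun x => x) false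
      let st := batch.foldl pvDone1 (d, ([] : List String))
      pvRoundsA fuel st.1 st.2 (batches ++ [batch])

def compute_insertion_order_py (deps : List (String × List String)) : List (List String) :=
  let g := pvGraph deps
  let info := pvBuildA g
  -- prepare(): the initially ready nodes (the raise on a cyclic graph is outside Pre_)
  let ready := (info.items.filter (fun kv => kv.2.1 == 0)).map (fun kv => kv.1)
  pvRoundsA (PySem.Dict.size info + 1) info ready []

-- ===== PORT B =====
-- Source B loop: emit sorted({n in remaining : remaining.isdisjoint(deps.get(n, ∅))}),
-- remove it from remaining; the CycleError raise is ported as [] (outside Pre_)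
def pvRoundsB : Nat → PySem.Dict String (List String) → PySem.Set String →
    List (List String) → List (List String)
  | 0, _, _, batches => batches
  | fuel+1, g, remaining, batches =>
    if remaining.isEmpty then batches
    else
      let front := PySem.List.sorted
        (remaining.filter (fun n => PySem.Set.isdisjoint remaining (g.getD n []))) (fun x => x) false
      if front.isEmpty then []   -- Source B: raise CycleError (never reached under Pre_)
      else pvRoundsB fuel g (PySem.Set.diff remaining front) (batches ++ [front])

def compute_insertion_order_py_alt (deps : List (String × List String)) : List (List String) :=
  let g := pvGraph deps
  let remaining := g.values.foldl (fun s ps => PySem.Set.union s ps) (PySem.Set.ofList g.keys)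
  pvRoundsB (remaining.length + 1) g remaining []

-- ===== PRECONDITION & SPEC =====
def pvPreds (deps : List (String × List String)) (n : String) : List String :=
  (pvGraph deps).getD n []

-- Pre_ excludes exactly the inputs whose dependency graph has a cycle, on which A
-- raises graphlib.CycleError (and B raises CycleError too); stated as well-foundedness:
-- every nonempty subset of the keys contains a node none of whose dependencies is in it.
def Pre_compute_insertion_order_py (deps : List (String × List String)) : Prop :=
  ∀ S ∈ (pvGraph deps).keys.sublists, S ≠ [] → ∃ n ∈ S, ∀ p ∈ pvPreds deps n, p ∉ S
instance (deps : List (String × List String)) : Decidable (Pre_compute_insertion_order_py deps) := by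
  unfold Pre_compute_insertion_order_py; infer_instance

def pvWitness_compute_insertion_order_py : (List (String × List String)) :=
  [("b", ["a", "c"]), ("a", [])]

def Spec_compute_insertion_order_py (deps : List (String × List String)) (out : List (List String)) : Prop := out = compute_insertion_order_py_alt deps
instance (deps : List (String × List String)) (out : List (List String)) : Decidable (Spec_compute_insertion_order_py deps out) := by unfold Spec_compute_insertion_order_py; infer_instance

-- ===== CLAIM (what is proved, stated in full; the proofs are below) =====
def Claim_equal_compute_insertion_order_py : Prop := ∀ (deps : List (String × List String)), Dom_compute_insertion_order_py deps → Pre_compute_insertion_order_py deps → Spec_compute_insertion_order_py deps (compute_insertion_order_py deps)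

-- ===== LEMMAS AND PROOFS =====

-- notation used throughout: pvP g q is q's (dedup'd) dependency list, pvSucc g q the
-- nodes that depend on q, pvCnt g R q the number of q's dependencies still in R
def pvP (g : PySem.Dict String (List String)) (n : String) : List String := g.getD n []
def pvSucc (g : PySem.Dict String (List String)) (q : String) : List String :=
  (g.items.filter (fun kv => decide (q ∈ kv.2))).map (fun kv => kv.1)
def pvCnt (g : PySem.Dict String (List String)) (R : List String) (q : String) : Int :=
  (((pvP g q).filter (fun p => decide (p ∈ R))).length : Int)
def pvCntL (L : List (String × List String)) (q : String) : Int :=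
  ((L.filter (fun kv => kv.1 == q)).map (fun kv => (kv.2.length : Int))).sum
def pvSuccL (L : List (String × List String)) (q : String) : List String :=
  (L.filter (fun kv => decide (q ∈ kv.2))).map (fun kv => kv.1)
-- Pre_, restated on the dict (definitially Pre_ deps with g := pvGraph deps)
def pvWF (g : PySem.Dict String (List String)) : Prop :=
  ∀ S ∈ g.keys.sublists, S ≠ [] → ∃ n ∈ S, ∀ p ∈ pvP g n, p ∉ S

-- generic list facts
theorem pv_filter_len_lt {α : Type} (l : List α) (p : α → Bool) (x : α)
    (hx : x ∈ l) (hp : ¬ p x = true) : (l.filter p).length < l.length := by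
  induction l with
  | nil => cases hx
  | cons a t ih =>
    simp only [List.filter_cons]
    rcases List.mem_cons.1 hx with rfl | hxt
    · simp [hp]; exact List.length_filter_le _ _
    · by_cases hpa : p a = true
      · simpa [hpa] using Nat.succ_lt_succ (ih hxt)
      · simp [hpa]; exact List.length_filter_le _ _

theorem pv_filter_singleton {β : Type} (L : List (String × β)) (hnd : (L.map Prod.fst).Nodup)
    {q : String} {v : β} (h : (q, v) ∈ L) : L.filter (fun kv => kv.1 == q) = [(q, v)] := by
  induction L with
  | nil => cases h
  | cons kv t ih =>
    simp only [List.map_cons, List.nodup_cons] at hnd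
    rcases List.mem_cons.1 h with rfl | ht
    · simp only [List.filter_cons, beq_self_eq_true, if_true]
      have hnil : t.filter (fun kv => kv.1 == q) = [] := by
        refine List.filter_eq_nil_iff.2 ?_
        intro a ha hbeq
        exact hnd.1 (List.mem_map.2 ⟨a, ha, beq_iff_eq.1 hbeq⟩)
      simp [hnil]
    · have hne : (kv.1 == q) = false := by
        refine beq_eq_false_iff_ne.2 ?_
        rintro rfl
        exact hnd.1 (List.mem_map.2 ⟨_, ht, rfl⟩)
      simp only [List.filter_cons, hne, if_false, Bool.false_eq_true]
      exact ih hnd.2 ht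

theorem pv_cnt_snoc_aux (l : List String) (hl : l.Nodup) (R prev : List String) (n : String)
    (hnR : n ∈ R) (hnp : n ∉ prev) :
    ((l.filter (fun p => decide (p ∈ R.filter (fun x => decide (x ∉ prev ++ [n]))))).length : Int)
      = ((l.filter (fun p => decide (p ∈ R.filter (fun x => decide (x ∉ prev))))).length : Int)
        - (if n ∈ l then 1 else 0) := by
  induction l with
  | nil => simp
  | cons a t ih =>
    have hat : a ∉ t := (List.nodup_cons.1 hl).1
    have ht : t.Nodup := (List.nodup_cons.1 hl).2
    by_cases han : a = n
    · subst han
      have h1 : (decide (a ∈ R.filter (fun x => decide (x ∉ prev ++ [a])))) = false := by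
        simp [List.mem_filter]
      have h2 : (decide (a ∈ R.filter (fun x => decide (x ∉ prev)))) = true := by
        simp [List.mem_filter, hnR, hnp]
      simp only [List.filter_cons, h1, h2, Bool.false_eq_true, if_false, if_true,
        List.length_cons, List.mem_cons, true_or, if_true]
      rw [ih ht]
      simp [hat]
    · have heq : (decide (a ∈ R.filter (fun x => decide (x ∉ prev ++ [n]))))
          = (decide (a ∈ R.filter (fun x => decide (x ∉ prev)))) := by
        simp only [List.mem_filter, List.mem_append, List.mem_singleton,
          decide_eq_true_eq, decide_eq_decide]
        constructor
        · rintro ⟨hr, hnot⟩; exact ⟨hr, fun hp => hnot (Or.inl hp)⟩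
        · rintro ⟨hr, hnot⟩; exact ⟨hr, fun hp => hp.elim hnot han⟩
      have hmem : (n ∈ a :: t) ↔ (n ∈ t) := by
        constructor
        · intro h
          rcases List.mem_cons.1 h with h1 | h2
          · exact absurd h1.symm han
          · exact h2
        · exact fun h => List.mem_cons_of_mem _ h
      rw [List.filter_cons, List.filter_cons, heq]
      have iht := ih ht
      by_cases hb : (decide (a ∈ R.filter (fun x => decide (x ∉ prev)))) = true
      · simp only [hb, if_true, List.length_cons, hmem]
        by_cases hnt : n ∈ t <;>
          simp only [hnt, if_true, if_false] at iht ⊢ <;> push_cast at iht ⊢ <;> omega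
      · simp only [Bool.not_eq_true] at hb
        simp only [hb, Bool.false_eq_true, if_false, hmem]
        by_cases hnt : n ∈ t <;>
          simp only [hnt, if_true, if_false] at iht ⊢ <;> push_cast at iht ⊢ <;> omega

theorem pv_second_elem {l : List String} (hl : l.Nodup) {n : String} (hn : n ∈ l)
    (hlen : l.length ≠ 1) : ∃ p ∈ l, p ≠ n := by
  cases l with
  | nil => cases hn
  | cons a t =>
    cases t with
    | nil =>
      simp only [List.mem_singleton] at hn
      exact absurd rfl hlen
    | cons b t2 =>
      by_cases han : a = n
      · subst han
        have hna : a ∉ b :: t2 := (List.nodup_cons.1 hl).1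
        refine ⟨b, List.mem_cons_of_mem _ (List.mem_cons_self ..), ?_⟩
        rintro rfl
        exact hna (List.mem_cons_self ..)
      · exact ⟨a, List.mem_cons_self .., han⟩

-- dict fold effects
theorem pv_succfold_getD (preds : List String) (hp : preds.Nodup) (node : String)
    (d : PySem.Dict String (Int × List String)) (q : String) :
    ((preds.foldl (fun d2 p => d2.modify p ((0:Int), ([]:List String)) (fun i => (i.1, i.2 ++ [node]))) d).getD q ((0:Int), ([]:List String)))
      = ((d.getD q ((0:Int), ([]:List String))).1,
         (d.getD q ((0:Int), ([]:List String))).2 ++ (if q ∈ preds then [node] else [])) := by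
  induction preds generalizing d with
  | nil => simp
  | cons p t ih =>
    have hpt : p ∉ t := (List.nodup_cons.1 hp).1
    have ht : t.Nodup := (List.nodup_cons.1 hp).2
    simp only [List.foldl_cons]
    rw [ih ht]
    rw [PySem.Dict.getD_modify]
    by_cases hqp : q = p
    · subst hqp
      simp [hpt]
    · simp [hqp, List.mem_cons]

theorem pv_addA_getD (d : PySem.Dict String (Int × List String)) (node : String)
    (preds : List String) (hp : preds.Nodup) (q : String) :
    (pvAddA d node preds).getD q ((0:Int), ([]:List String))
      = ((d.getD q ((0:Int), ([]:List String))).1 + (if q = node then (preds.length : Int) else 0),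
         (d.getD q ((0:Int), ([]:List String))).2 ++ (if q ∈ preds then [node] else [])) := by
  unfold pvAddA
  rw [pv_succfold_getD preds hp node _ q]
  rw [PySem.Dict.getD_modify]
  by_cases hq : q = node
  · subst hq; simp
  · simp [hq]

theorem pv_addAll_getD (L : List (String × List String)) (hv : ∀ kv ∈ L, kv.2.Nodup)
    (d : PySem.Dict String (Int × List String)) (q : String) :
    ((L.foldl (fun d kv => pvAddA d kv.1 kv.2) d).getD q ((0:Int), ([]:List String)))
      = ((d.getD q ((0:Int), ([]:List String))).1 + pvCntL L q,
         (d.getD q ((0:Int), ([]:List String))).2 ++ pvSuccL L q) := by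
  induction L generalizing d with
  | nil => simp [pvCntL, pvSuccL]
  | cons kv t ih =>
    have hv1 : kv.2.Nodup := hv kv (List.mem_cons_self ..)
    have hvt : ∀ kv' ∈ t, kv'.2.Nodup := fun kv' h => hv kv' (List.mem_cons_of_mem _ h)
    simp only [List.foldl_cons]
    rw [ih hvt]
    rw [pv_addA_getD d kv.1 kv.2 hv1 q]
    have hc : pvCntL (kv :: t) q = (if q = kv.1 then (kv.2.length : Int) else 0) + pvCntL t q := by
      simp only [pvCntL, List.filter_cons]
      by_cases h : kv.1 = q
      · simp [h, beq_iff_eq, eq_comm]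
      · have hb : (kv.1 == q) = false := beq_eq_false_iff_ne.2 h
        have hq : ¬ (q = kv.1) := fun hh => h hh.symm
        simp [hb, hq]
    have hs : pvSuccL (kv :: t) q = (if q ∈ kv.2 then [kv.1] else []) ++ pvSuccL t q := by
      simp only [pvSuccL, List.filter_cons]
      by_cases h : q ∈ kv.2 <;> simp [h]
    rw [hc, hs]
    simp [Prod.ext_iff, add_assoc, List.append_assoc]

theorem pv_modify_mem_keys {ν : Type} (d : PySem.Dict String ν) (k : String) (d0 : ν)
    (f : ν → ν) (q : String) : q ∈ (d.modify k d0 f).keys ↔ q ∈ d.keys ∨ q = k := by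
  rw [PySem.Dict.keys_modify]
  rw [PySem.Dict.mem_keys_insert]
  tauto

theorem pv_modify_keys_nodup {ν : Type} (d : PySem.Dict String ν) (k : String) (d0 : ν)
    (f : ν → ν) (h : d.keys.Nodup) : (d.modify k d0 f).keys.Nodup := by
  rw [PySem.Dict.keys_modify]
  exact PySem.Dict.nodup_keys_insert _ _ _ h

theorem pv_addA_mem_keys (d : PySem.Dict String (Int × List String)) (node : String)
    (preds : List String) (q : String) :
    q ∈ (pvAddA d node preds).keys ↔ q ∈ d.keys ∨ q = node ∨ q ∈ preds := by
  unfold pvAddA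
  have aux : ∀ (ps : List String) (d2 : PySem.Dict String (Int × List String)),
      q ∈ (ps.foldl (fun d2 p => d2.modify p ((0:Int), ([]:List String)) (fun i => (i.1, i.2 ++ [node]))) d2).keys
        ↔ q ∈ d2.keys ∨ q ∈ ps := by
    intro ps
    induction ps with
    | nil => simp
    | cons p t ih =>
      intro d2
      simp only [List.foldl_cons]
      rw [ih]
      rw [pv_modify_mem_keys]
      simp [List.mem_cons, or_assoc]
  rw [aux]
  rw [pv_modify_mem_keys]
  tauto

theorem pv_addA_keys_nodup (d : PySem.Dict String (Int × List String)) (node : String)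
    (preds : List String) (h : d.keys.Nodup) : (pvAddA d node preds).keys.Nodup := by
  unfold pvAddA
  have aux : ∀ (ps : List String) (d2 : PySem.Dict String (Int × List String)), d2.keys.Nodup →
      (ps.foldl (fun d2 p => d2.modify p ((0:Int), ([]:List String)) (fun i => (i.1, i.2 ++ [node]))) d2).keys.Nodup := by
    intro ps
    induction ps with
    | nil => exact fun d2 h2 => h2
    | cons p t ih =>
      intro d2 h2
      simp only [List.foldl_cons]
      exact ih _ (pv_modify_keys_nodup _ _ _ _ h2)
  exact aux _ _ (pv_modify_keys_nodup _ _ _ _ h)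

theorem pv_addAll_mem_keys (L : List (String × List String))
    (d : PySem.Dict String (Int × List String)) (q : String) :
    q ∈ (L.foldl (fun d kv => pvAddA d kv.1 kv.2) d).keys
      ↔ q ∈ d.keys ∨ q ∈ L.map Prod.fst ∨ ∃ kv ∈ L, q ∈ kv.2 := by
  induction L generalizing d with
  | nil => simp
  | cons kv t ih =>
    simp only [List.foldl_cons]
    rw [ih, pv_addA_mem_keys]
    simp only [List.map_cons, List.mem_cons]
    constructor
    · rintro ((h | h | h) | h | ⟨kv2, h2, h3⟩)
      · exact Or.inl h
      · exact Or.inr (Or.inl (Or.inl h))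
      · exact Or.inr (Or.inr ⟨kv, Or.inl rfl, h⟩)
      · exact Or.inr (Or.inl (Or.inr h))
      · exact Or.inr (Or.inr ⟨kv2, Or.inr h2, h3⟩)
    · rintro (h | (h | h) | ⟨kv2, (rfl | h4), h3⟩)
      · exact Or.inl (Or.inl h)
      · exact Or.inl (Or.inr (Or.inl h))
      · exact Or.inr (Or.inl h)
      · exact Or.inl (Or.inr (Or.inr h3))
      · exact Or.inr (Or.inr ⟨kv2, h4, h3⟩)

theorem pv_addAll_keys_nodup (L : List (String × List String))
    (d : PySem.Dict String (Int × List String)) (h : d.keys.Nodup) :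
    (L.foldl (fun d kv => pvAddA d kv.1 kv.2) d).keys.Nodup := by
  induction L generalizing d with
  | nil => exact h
  | cons kv t ih =>
    simp only [List.foldl_cons]
    exact ih _ (pv_addA_keys_nodup _ _ _ h)

-- facts about the normalized input graph
theorem pv_graph_keys_nodup (deps : List (String × List String)) : (pvGraph deps).keys.Nodup := by
  exact PySem.Dict.nodup_keys_foldl_insert_key deps Prod.fst
    (fun _ p => PySem.List.dedup p.2) PySem.Dict.empty PySem.Dict.nodup_keys_empty

theorem pv_graph_vals_nodup (deps : List (String × List String)) :
    ∀ kv ∈ (pvGraph deps).items, kv.2.Nodup := by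
  have aux : ∀ (L : List (String × List String)) (d : PySem.Dict String (List String)),
      (∀ kv ∈ d.items, kv.2.Nodup) →
      ∀ kv ∈ (L.foldl (fun d p => d.insert p.1 (PySem.List.dedup p.2)) d).items, kv.2.Nodup := by
    intro L
    induction L with
    | nil => exact fun d h => h
    | cons p t ih =>
      intro d h
      simp only [List.foldl_cons]
      refine ih _ ?_
      intro kv hkv
      rcases (PySem.Dict.mem_items_insert _ _ _ _).1 hkv with rfl | ⟨h2, _⟩
      · exact PySem.List.nodup_dedup _
      · exact h kv h2
  exact aux deps PySem.Dict.empty (by simp [PySem.Dict.empty])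

theorem pv_P_eq_nil_of_not_key (g : PySem.Dict String (List String)) (q : String)
    (h : q ∉ g.keys) : pvP g q = [] := by
  unfold pvP
  exact PySem.Dict.getD_of_get?_eq_none _ _ ((PySem.Dict.get?_eq_none_iff_not_mem_keys _ _).2 h)

theorem pv_P_mem_key (g : PySem.Dict String (List String)) (q : String)
    (h : pvP g q ≠ []) : q ∈ g.keys ∧ (q, pvP g q) ∈ g.items := by
  by_cases hq : q ∈ g.keys
  · refine ⟨hq, ?_⟩
    cases hg : g.get? q with
    | none => exact absurd ((PySem.Dict.get?_eq_none_iff_not_mem_keys _ _).1 hg) (by simpa using hq)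
    | some v =>
      have hv : pvP g q = v := by
        unfold pvP
        rw [PySem.Dict.getD_eq_get?_getD, hg]
        rfl
      rw [hv]
      exact PySem.Dict.mem_items_of_get?_eq_some _ hg
  · exact absurd (pv_P_eq_nil_of_not_key g q hq) h

theorem pv_P_nodup (deps : List (String × List String)) (q : String) :
    (pvP (pvGraph deps) q).Nodup := by
  by_cases h : pvP (pvGraph deps) q = []
  · rw [h]; exact List.nodup_nil
  · obtain ⟨-, hmem⟩ := pv_P_mem_key _ _ h
    exact pv_graph_vals_nodup deps _ hmem

theorem pv_P_sub_nodes (g : PySem.Dict String (List String)) (q p : String)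
    (h : p ∈ pvP g q) : ∃ kv ∈ g.items, p ∈ kv.2 := by
  have hne : pvP g q ≠ [] := fun hn => by simp [hn] at h
  obtain ⟨-, hmem⟩ := pv_P_mem_key g q hne
  exact ⟨(q, pvP g q), hmem, h⟩

theorem pv_succ_mem (g : PySem.Dict String (List String)) (hk : g.keys.Nodup) (n q : String) :
    q ∈ pvSucc g n ↔ n ∈ pvP g q := by
  unfold pvSucc
  simp only [List.mem_map, List.mem_filter, decide_eq_true_eq]
  constructor
  · rintro ⟨kv, ⟨hkv, hn⟩, rfl⟩
    have : g.getD kv.1 [] = kv.2 := PySem.Dict.getD_of_mem_items g (by exact hkv) hk []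
    unfold pvP
    rw [this]
    exact hn
  · intro hn
    have hne : pvP g q ≠ [] := fun h => by simp [h] at hn
    obtain ⟨-, hmem⟩ := pv_P_mem_key g q hne
    exact ⟨(q, pvP g q), ⟨hmem, hn⟩, rfl⟩

theorem pv_succ_nodup (g : PySem.Dict String (List String)) (hk : g.keys.Nodup) (q : String) :
    (pvSucc g q).Nodup := by
  unfold pvSucc
  have hsub : ((g.items.filter (fun kv => decide (q ∈ kv.2))).map (fun kv => kv.1)).Sublist
      (g.items.map (fun kv => kv.1)) := List.filter_sublist.map _
  exact hsub.nodup hk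

-- the dict built by TopologicalSorter(deps)
theorem pv_build_getD (g : PySem.Dict String (List String)) (hk : g.keys.Nodup)
    (hv : ∀ kv ∈ g.items, kv.2.Nodup) (q : String) :
    (pvBuildA g).getD q ((0:Int), ([]:List String)) = (((pvP g q).length : Int), pvSucc g q) := by
  unfold pvBuildA
  rw [pv_addAll_getD g.items hv PySem.Dict.empty q]
  rw [PySem.Dict.getD_empty]
  have hcnt : pvCntL g.items q = ((pvP g q).length : Int) := by
    by_cases hq : q ∈ g.keys
    · obtain ⟨kv, hkv, h1⟩ := List.mem_map.1 (show q ∈ g.items.map Prod.fst from hq)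
      cases kv with
      | mk a b =>
        cases h1
        have hPv : pvP g a = b := PySem.Dict.getD_of_mem_items g hkv hk []
        unfold pvCntL
        rw [pv_filter_singleton g.items hk hkv]
        simp [hPv]
    · have hnil : g.items.filter (fun kv => kv.1 == q) = [] := by
        refine List.filter_eq_nil_iff.2 ?_
        intro kv hkv hbeq
        exact hq (beq_iff_eq.1 hbeq ▸ PySem.Dict.mem_keys_of_mem_items g hkv)
      unfold pvCntL
      rw [hnil]
      simp [pv_P_eq_nil_of_not_key g q hq]
  rw [hcnt]
  simp [pvSucc, pvSuccL]

theorem pv_build_mem_keys (g : PySem.Dict String (List String)) (q : String) :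
    q ∈ (pvBuildA g).keys ↔ q ∈ g.keys ∨ ∃ kv ∈ g.items, q ∈ kv.2 := by
  unfold pvBuildA
  rw [pv_addAll_mem_keys]
  constructor
  · rintro (h | h | h)
    · simp [PySem.Dict.empty, PySem.Dict.keys] at h
    · exact Or.inl h
    · exact Or.inr h
  · rintro (h | h)
    · exact Or.inr (Or.inl h)
    · exact Or.inr (Or.inr h)

theorem pv_build_keys_nodup (g : PySem.Dict String (List String)) : (pvBuildA g).keys.Nodup := by
  exact pv_addAll_keys_nodup _ _ PySem.Dict.nodup_keys_empty

-- B's initial pending set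
theorem pv_R0_mem (g : PySem.Dict String (List String)) (q : String) :
    q ∈ (g.values.foldl (fun s ps => PySem.Set.union s ps) (PySem.Set.ofList g.keys))
      ↔ q ∈ g.keys ∨ ∃ kv ∈ g.items, q ∈ kv.2 := by
  have aux : ∀ (L : List (List String)) (s : PySem.Set String),
      q ∈ L.foldl (fun s ps => PySem.Set.union s ps) s ↔ q ∈ s ∨ ∃ v ∈ L, q ∈ v := by
    intro L
    induction L with
    | nil => simp
    | cons v t ih =>
      intro s
      simp only [List.foldl_cons]
      rw [ih]
      rw [PySem.Set.mem_union]
      simp only [List.exists_mem_cons_iff]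
      tauto
  rw [aux]
  rw [PySem.Set.mem_ofList]
  have hv : (∃ v ∈ g.values, q ∈ v) ↔ ∃ kv ∈ g.items, q ∈ kv.2 := by
    constructor
    · rintro ⟨v, hv, hq⟩
      obtain ⟨kv, hkv, rfl⟩ := List.mem_map.1 hv
      exact ⟨kv, hkv, hq⟩
    · rintro ⟨kv, hkv, hq⟩
      exact ⟨kv.2, List.mem_map.2 ⟨kv, hkv, rfl⟩, hq⟩
  rw [hv]

theorem pv_R0_nodup (g : PySem.Dict String (List String)) :
    (g.values.foldl (fun s ps => PySem.Set.union s ps) (PySem.Set.ofList g.keys)).Nodup := by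
  have aux : ∀ (L : List (List String)) (s : PySem.Set String), s.Nodup →
      (L.foldl (fun s ps => PySem.Set.union s ps) s).Nodup := by
    intro L
    induction L with
    | nil => exact fun s h => h
    | cons v t ih =>
      intro s h
      exact ih _ (PySem.Set.nodup_union _ _ h)
  exact aux _ _ (PySem.Set.nodup_ofList _)

-- initially-ready nodes read off the items list
theorem pv_ready0_mem (d : PySem.Dict String (Int × List String)) (hk : d.keys.Nodup) (q : String) :
    q ∈ ((d.items.filter (fun kv => kv.2.1 == 0)).map (fun kv => kv.1))
      ↔ q ∈ d.keys ∧ (d.getD q ((0:Int), ([]:List String))).1 = 0 := by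
  constructor
  · intro h
    simp only [List.mem_map, List.mem_filter] at h
    obtain ⟨kv, ⟨hkv, hz⟩, rfl⟩ := h
    refine ⟨PySem.Dict.mem_keys_of_mem_items d hkv, ?_⟩
    have hg : d.getD kv.1 ((0:Int), ([]:List String)) = kv.2 :=
      PySem.Dict.getD_of_mem_items d hkv hk _
    rw [hg]
    exact beq_iff_eq.1 hz
  · rintro ⟨hq, hz⟩
    obtain ⟨kv, hkv, h1⟩ := List.mem_map.1 (show q ∈ d.items.map Prod.fst from hq)
    cases kv with
    | mk a b =>
      cases h1
      have hg : d.getD a ((0:Int), ([]:List String)) = b :=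
        PySem.Dict.getD_of_mem_items d hkv hk _
      refine List.mem_map.2 ⟨(a, b), List.mem_filter.2 ⟨hkv, ?_⟩, rfl⟩
      rw [hg] at hz
      exact beq_iff_eq.2 hz

theorem pv_ready0_nodup {ν : Type} (d : PySem.Dict String ν) (p : String × ν → Bool)
    (hk : d.keys.Nodup) : ((d.items.filter p).map (fun kv => kv.1)).Nodup := by
  have hsub : ((d.items.filter p).map (fun kv => kv.1)).Sublist
      (d.items.map (fun kv => kv.1)) := List.filter_sublist.map _
  exact hsub.nodup hk

-- one sorter.done(n) call: the inner decrement fold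
theorem pv_dec_fold (g : PySem.Dict String (List String)) (R prev batch : List String) (n : String)
    (hgk : g.keys.Nodup) (hPnd : ∀ q, (pvP g q).Nodup)
    (hclosed : ∀ q, q ∉ R → ∀ p ∈ pvP g q, p ∉ R)
    (hbatch : ∀ q, q ∈ batch ↔ q ∈ R ∧ ∀ p ∈ pvP g q, p ∉ R)
    (hn : n ∈ R) (hnp : n ∉ prev) :
    ∀ (todoS prevS : List String) (d : PySem.Dict String (Int × List String)) (nr : List String),
    (prevS ++ todoS).Nodup →
    (∀ q, q ∈ prevS ++ todoS ↔ n ∈ pvP g q) →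
    (∀ q, d.getD q ((0:Int), ([]:List String))
        = (pvCnt g (R.filter (fun x => decide (x ∉ prev))) q - (if q ∈ prevS then 1 else 0), pvSucc g q)) →
    nr.Nodup →
    (∀ q, q ∈ nr ↔ (q ∈ R ∧ q ∉ batch ∧ ∀ p ∈ pvP g q, p ∈ R → p ∈ prev)
        ∨ (q ∈ prevS ∧ ∀ p ∈ pvP g q, p ∈ R → p ∈ prev ++ [n])) →
    (∀ q, (todoS.foldl (fun st2 s =>
        let d := st2.1.modify s ((0:Int), ([]:List String)) (fun i => (i.1 - 1, i.2))
        if (d.getD s ((0:Int), [])).1 = 0 then (d, st2.2 ++ [s]) else (d, st2.2)) (d, nr)).1.getD q ((0:Int), ([]:List String))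
        = (pvCnt g (R.filter (fun x => decide (x ∉ prev))) q - (if q ∈ prevS ++ todoS then 1 else 0), pvSucc g q))
    ∧ ((todoS.foldl (fun st2 s =>
        let d := st2.1.modify s ((0:Int), ([]:List String)) (fun i => (i.1 - 1, i.2))
        if (d.getD s ((0:Int), [])).1 = 0 then (d, st2.2 ++ [s]) else (d, st2.2)) (d, nr)).2.Nodup
    ∧ (∀ q, q ∈ (todoS.foldl (fun st2 s =>
        let d := st2.1.modify s ((0:Int), ([]:List String)) (fun i => (i.1 - 1, i.2))
        if (d.getD s ((0:Int), [])).1 = 0 then (d, st2.2 ++ [s]) else (d, st2.2)) (d, nr)).2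
        ↔ (q ∈ R ∧ q ∉ batch ∧ ∀ p ∈ pvP g q, p ∈ R → p ∈ prev)
          ∨ (q ∈ prevS ++ todoS ∧ ∀ p ∈ pvP g q, p ∈ R → p ∈ prev ++ [n]))) := by
  intro todoS
  induction todoS with
  | nil =>
    intro prevS d nr hnd hSmem hd hnrnd hnr
    refine ⟨?_, hnrnd, ?_⟩
    · simpa using hd
    · simpa using hnr
  | cons s rest ih =>
    intro prevS d nr hnd hSmem hd hnrnd hnr
    have hsprevS : s ∉ prevS := by
      have hdisj := List.disjoint_of_nodup_append hnd
      exact fun hs => hdisj hs (List.mem_cons_self ..)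
    have hsrest : s ∉ rest := by
      have h2 : (s :: rest).Nodup := (List.nodup_append.1 hnd).2.1
      exact (List.nodup_cons.1 h2).1
    have hnPs : n ∈ pvP g s := (hSmem s).1 (by simp)
    have hnRp : n ∈ R.filter (fun x => decide (x ∉ prev)) :=
      List.mem_filter.2 ⟨hn, by simpa using hnp⟩
    have hnF : n ∈ (pvP g s).filter (fun p => decide (p ∈ R.filter (fun x => decide (x ∉ prev)))) :=
      List.mem_filter.2 ⟨hnPs, by simpa using hnRp⟩
    have hFnd : ((pvP g s).filter (fun p => decide (p ∈ R.filter (fun x => decide (x ∉ prev))))).Nodup :=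
      (hPnd s).filter _
    have hcs : pvCnt g (R.filter (fun x => decide (x ∉ prev))) s ≥ 1 := by
      unfold pvCnt
      have := List.length_pos_of_mem hnF
      omega
    have hds : d.getD s ((0:Int), ([]:List String))
        = (pvCnt g (R.filter (fun x => decide (x ∉ prev))) s, pvSucc g s) := by
      rw [hd s]
      simp [hsprevS]
    have hsnotnr : s ∉ nr := by
      intro hs
      rcases (hnr s).1 hs with ⟨hsR, hsb, hsub⟩ | ⟨hsp, _⟩
      · exact hnp (hsub n hnPs hn)
      · exact hsprevS hsp
    -- one decrement step
    rw [List.foldl_cons]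
    have hstep : (let d_1 := (d, nr).1.modify s ((0:Int), ([]:List String)) (fun i => (i.1 - 1, i.2))
        if (d_1.getD s ((0:Int), [])).1 = 0 then (d_1, (d, nr).2 ++ [s]) else (d_1, (d, nr).2))
        = (if ((d.modify s ((0:Int), ([]:List String)) (fun i => (i.1 - 1, i.2))).getD s ((0:Int), [])).1 = 0
            then (d.modify s ((0:Int), ([]:List String)) (fun i => (i.1 - 1, i.2)), nr ++ [s])
            else (d.modify s ((0:Int), ([]:List String)) (fun i => (i.1 - 1, i.2)), nr)) := rfl
    rw [hstep]
    have hd's : ((d.modify s ((0:Int), ([]:List String)) (fun i => (i.1 - 1, i.2))).getD s ((0:Int), [])).1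
        = pvCnt g (R.filter (fun x => decide (x ∉ prev))) s - 1 := by
      rw [PySem.Dict.getD_modify]
      simp [hds]
    have hd' : ∀ q, (d.modify s ((0:Int), ([]:List String)) (fun i => (i.1 - 1, i.2))).getD q ((0:Int), ([]:List String))
        = (pvCnt g (R.filter (fun x => decide (x ∉ prev))) q - (if q ∈ prevS ++ [s] then 1 else 0), pvSucc g q) := by
      intro q
      rw [PySem.Dict.getD_modify]
      by_cases hq : q = s
      · subst hq
        rw [hds]
        simp
      · rw [hd q]
        simp [List.mem_append, hq]
    have hnd' : ((prevS ++ [s]) ++ rest).Nodup := by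
      simpa [List.append_assoc] using hnd
    have hSmem' : ∀ q, q ∈ (prevS ++ [s]) ++ rest ↔ n ∈ pvP g q := by
      intro q
      rw [← hSmem q]
      simp [List.mem_append, List.mem_cons]
    have hsetiff : ∀ q, q ∈ (prevS ++ [s]) ++ rest ↔ q ∈ prevS ++ s :: rest := by
      intro q
      simp [List.mem_append, List.mem_cons]
    by_cases hc : ((d.modify s ((0:Int), ([]:List String)) (fun i => (i.1 - 1, i.2))).getD s ((0:Int), [])).1 = 0
    · rw [if_pos hc]
      -- the count was exactly 1: n is s's only pending dependency
      have hcs1 : pvCnt g (R.filter (fun x => decide (x ∉ prev))) s = 1 := by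
        rw [hd's] at hc; omega
      have honly : ∀ p ∈ pvP g s, p ∈ R → p ∉ prev → p = n := by
        intro p hp hpR hpprev
        have hlen1 : ((pvP g s).filter (fun p => decide (p ∈ R.filter (fun x => decide (x ∉ prev))))).length = 1 := by
          unfold pvCnt at hcs1
          omega
        obtain ⟨x, hx⟩ := List.length_eq_one_iff.1 hlen1
        have hpF : p ∈ (pvP g s).filter (fun p => decide (p ∈ R.filter (fun x => decide (x ∉ prev)))) :=
          List.mem_filter.2 ⟨hp, by simp [List.mem_filter, hpR, hpprev]⟩
        rw [hx] at hpF hnF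
        simp at hpF hnF
        rw [hpF, hnF]
      have hsdisj2 : ∀ p ∈ pvP g s, p ∈ R → p ∈ prev ++ [n] := by
        intro p hp hpR
        by_cases hpprev : p ∈ prev
        · simp [List.mem_append, hpprev]
        · simp [List.mem_append, honly p hp hpR hpprev]
      have hnrnd' : (nr ++ [s]).Nodup := by
        simp [List.nodup_append, hnrnd]
        intro a ha hb
        subst hb
        exact hsnotnr ha
      have hnr' : ∀ q, q ∈ nr ++ [s] ↔
          (q ∈ R ∧ q ∉ batch ∧ ∀ p ∈ pvP g q, p ∈ R → p ∈ prev)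
          ∨ (q ∈ prevS ++ [s] ∧ ∀ p ∈ pvP g q, p ∈ R → p ∈ prev ++ [n]) := by
        intro q
        constructor
        · intro hq
          rcases List.mem_append.1 hq with hq | hq
          · rcases (hnr q).1 hq with h1 | ⟨h2a, h2b⟩
            · exact Or.inl h1
            · exact Or.inr ⟨List.mem_append.2 (Or.inl h2a), h2b⟩
          · have hqs : q = s := by simpa using hq
            subst hqs
            exact Or.inr ⟨List.mem_append.2 (Or.inr (by simp)), hsdisj2⟩
        · rintro (h1 | ⟨h2a, h2b⟩)
          · exact List.mem_append.2 (Or.inl ((hnr q).2 (Or.inl h1)))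
          · rcases List.mem_append.1 h2a with hq | hq
            · exact List.mem_append.2 (Or.inl ((hnr q).2 (Or.inr ⟨hq, h2b⟩)))
            · have hqs : q = s := by simpa using hq
              subst hqs
              exact List.mem_append.2 (Or.inr (by simp))
      have hres := ih (prevS ++ [s]) _ _ hnd' hSmem' hd' hnrnd' hnr'
      refine ⟨?_, hres.2.1, ?_⟩
      · intro q
        rw [hres.1 q]
        simp only [hsetiff]
      · intro q
        rw [hres.2.2 q]
        simp only [hsetiff]
    · rw [if_neg hc]
      -- count stays positive: s has another pending dependency besides n
      have hcs2 : pvCnt g (R.filter (fun x => decide (x ∉ prev))) s ≠ 1 := by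
        rw [hd's] at hc; omega
      have hnot2 : ¬ (∀ p ∈ pvP g s, p ∈ R → p ∈ prev ++ [n]) := by
        intro hsub
        have hlen : ((pvP g s).filter (fun p => decide (p ∈ R.filter (fun x => decide (x ∉ prev))))).length ≠ 1 := by
          unfold pvCnt at hcs2
          omega
        obtain ⟨p, hpF, hpn⟩ := pv_second_elem hFnd hnF hlen
        have hp := List.mem_filter.1 hpF
        have hpRp := List.mem_filter.1 (by simpa using hp.2 : p ∈ R.filter (fun x => decide (x ∉ prev)))
        have := hsub p hp.1 hpRp.1
        rcases List.mem_append.1 this with hh | hh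
        · exact (by simpa using hpRp.2 : p ∉ prev) hh
        · exact hpn (by simpa using hh)
      have hnr' : ∀ q, q ∈ nr ↔
          (q ∈ R ∧ q ∉ batch ∧ ∀ p ∈ pvP g q, p ∈ R → p ∈ prev)
          ∨ (q ∈ prevS ++ [s] ∧ ∀ p ∈ pvP g q, p ∈ R → p ∈ prev ++ [n]) := by
        intro q
        rw [hnr q]
        constructor
        · rintro (h1 | ⟨h2a, h2b⟩)
          · exact Or.inl h1
          · exact Or.inr ⟨List.mem_append.2 (Or.inl h2a), h2b⟩
        · rintro (h1 | ⟨h2a, h2b⟩)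
          · exact Or.inl h1
          · rcases List.mem_append.1 h2a with hq | hq
            · exact Or.inr ⟨hq, h2b⟩
            · have : q = s := by simpa using hq
              subst this
              exact absurd h2b hnot2
      have hres := ih (prevS ++ [s]) _ _ hnd' hSmem' hd' hnrnd hnr'
      refine ⟨?_, hres.2.1, ?_⟩
      · intro q
        rw [hres.1 q]
        simp only [hsetiff]
      · intro q
        rw [hres.2.2 q]
        simp only [hsetiff]

-- done(*batch): the outer fold over the whole emitted batch
theorem pv_batch_fold (g : PySem.Dict String (List String)) (R batch : List String)
    (hgk : g.keys.Nodup) (hPnd : ∀ q, (pvP g q).Nodup) (hR : R.Nodup)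
    (hclosed : ∀ q, q ∉ R → ∀ p ∈ pvP g q, p ∉ R)
    (hbatchNd : batch.Nodup)
    (hbatch : ∀ q, q ∈ batch ↔ q ∈ R ∧ ∀ p ∈ pvP g q, p ∉ R) :
    ∀ (todo prev : List String) (d : PySem.Dict String (Int × List String)) (nr : List String),
    prev ++ todo = batch →
    (∀ q, d.getD q ((0:Int), ([]:List String))
        = (pvCnt g (R.filter (fun x => decide (x ∉ prev))) q, pvSucc g q)) →
    nr.Nodup →
    (∀ q, q ∈ nr ↔ q ∈ R ∧ q ∉ batch ∧ ∀ p ∈ pvP g q, p ∈ R → p ∈ prev) →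
    (∀ q, (todo.foldl pvDone1 (d, nr)).1.getD q ((0:Int), ([]:List String))
        = (pvCnt g (R.filter (fun x => decide (x ∉ batch))) q, pvSucc g q))
    ∧ (todo.foldl pvDone1 (d, nr)).2.Nodup
    ∧ (∀ q, q ∈ (todo.foldl pvDone1 (d, nr)).2
        ↔ q ∈ R ∧ q ∉ batch ∧ ∀ p ∈ pvP g q, p ∈ R → p ∈ batch) := by
  intro todo
  induction todo with
  | nil =>
    intro prev d nr hsplit hd hnrnd hnr
    have hpb : prev = batch := by simpa using hsplit
    subst hpb
    exact ⟨hd, hnrnd, hnr⟩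
  | cons m rest ih =>
    intro prev d nr hsplit hd hnrnd hnr
    have hmb : m ∈ batch := hsplit ▸ List.mem_append.2 (Or.inr (List.mem_cons_self ..))
    have hmR : m ∈ R := ((hbatch m).1 hmb).1
    have hmprev : m ∉ prev := by
      have hnd2 : (prev ++ m :: rest).Nodup := hsplit ▸ hbatchNd
      exact fun hp => List.disjoint_of_nodup_append hnd2 hp (List.mem_cons_self ..)
    rw [List.foldl_cons]
    have hDone : pvDone1 (d, nr) m
        = ((pvSucc g m).foldl (fun st2 s =>
            let d := st2.1.modify s ((0:Int), ([]:List String)) (fun i => (i.1 - 1, i.2))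
            if (d.getD s ((0:Int), [])).1 = 0 then (d, st2.2 ++ [s]) else (d, st2.2)) (d, nr)) := by
      unfold pvDone1
      rw [hd m]
    rw [hDone]
    have hdec := pv_dec_fold g R prev batch m hgk hPnd hclosed hbatch hmR hmprev
      (pvSucc g m) [] d nr
      (by simpa using pv_succ_nodup g hgk m)
      (by intro q; simpa using pv_succ_mem g hgk m q)
      (by intro q; rw [hd q]; simp)
      hnrnd
      (by intro q; rw [hnr q]; simp)
    obtain ⟨hd1, hnd1, hnr1⟩ := hdec
    -- convert the state facts from "prev, one more node done" to "prev ++ [m]"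
    have hd2 : ∀ q, ((pvSucc g m).foldl (fun st2 s =>
        let d := st2.1.modify s ((0:Int), ([]:List String)) (fun i => (i.1 - 1, i.2))
        if (d.getD s ((0:Int), [])).1 = 0 then (d, st2.2 ++ [s]) else (d, st2.2)) (d, nr)).1.getD q ((0:Int), ([]:List String))
        = (pvCnt g (R.filter (fun x => decide (x ∉ prev ++ [m]))) q, pvSucc g q) := by
      intro q
      rw [hd1 q]
      have hsnoc := pv_cnt_snoc_aux (pvP g q) (hPnd q) R prev m hmR hmprev
      have hcnt2 : pvCnt g (R.filter (fun x => decide (x ∉ prev ++ [m]))) q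
          = pvCnt g (R.filter (fun x => decide (x ∉ prev))) q - (if m ∈ pvP g q then 1 else 0) := by
        unfold pvCnt
        exact hsnoc
      rw [hcnt2]
      simp only [List.nil_append, pv_succ_mem g hgk m]
    have hnr2 : ∀ q, q ∈ ((pvSucc g m).foldl (fun st2 s =>
        let d := st2.1.modify s ((0:Int), ([]:List String)) (fun i => (i.1 - 1, i.2))
        if (d.getD s ((0:Int), [])).1 = 0 then (d, st2.2 ++ [s]) else (d, st2.2)) (d, nr)).2
        ↔ q ∈ R ∧ q ∉ batch ∧ ∀ p ∈ pvP g q, p ∈ R → p ∈ prev ++ [m] := by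
      intro q
      rw [hnr1 q]
      simp only [List.nil_append]
      constructor
      · rintro (⟨h1, h2, h3⟩ | ⟨h1, h2⟩)
        · exact ⟨h1, h2, fun p hp hpR => List.mem_append.2 (Or.inl (h3 p hp hpR))⟩
        · have hmPq : m ∈ pvP g q := (pv_succ_mem g hgk m q).1 h1
          have hqR : q ∈ R := by
            by_contra hqR
            exact hclosed q hqR m hmPq hmR
          have hqb : q ∉ batch := fun hb => ((hbatch q).1 hb).2 m hmPq hmR
          exact ⟨hqR, hqb, h2⟩
      · rintro ⟨h1, h2, h3⟩
        by_cases hmPq : m ∈ pvP g q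
        · exact Or.inr ⟨(pv_succ_mem g hgk m q).2 hmPq, h3⟩
        · refine Or.inl ⟨h1, h2, fun p hp hpR => ?_⟩
          rcases List.mem_append.1 (h3 p hp hpR) with hh | hh
          · exact hh
          · exact absurd ((by simpa using hh : p = m) ▸ hp) hmPq
    have hsplit' : (prev ++ [m]) ++ rest = batch := by
      rw [List.append_assoc]
      simpa using hsplit
    exact ih (prev ++ [m]) _ _ hsplit' hd2 hnd1 hnr2

-- under Pre_ every nonempty pending set has a node with no pending dependency
theorem pv_front_nonempty (g : PySem.Dict String (List String)) (hwf : pvWF g)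
    (R : List String) (hne : R ≠ []) : ∃ n ∈ R, ∀ p ∈ pvP g n, p ∉ R := by
  by_cases hall : ∀ r ∈ R, r ∈ g.keys
  · obtain ⟨r0, hr0⟩ := List.exists_mem_of_ne_nil R hne
    have hSsub : g.keys.filter (fun k => decide (k ∈ R)) ∈ g.keys.sublists :=
      List.mem_sublists.2 List.filter_sublist
    have hSne : g.keys.filter (fun k => decide (k ∈ R)) ≠ [] :=
      List.ne_nil_of_mem (List.mem_filter.2 ⟨hall r0 hr0, by simpa using hr0⟩)
    obtain ⟨n, hnS, hnp⟩ := hwf _ hSsub hSne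
    have hnR : n ∈ R := by simpa using (List.mem_filter.1 hnS).2
    refine ⟨n, hnR, fun p hp hpR => ?_⟩
    exact hnp p hp (List.mem_filter.2 ⟨hall p hpR, by simpa using hpR⟩)
  · obtain ⟨r, hrR, hrk⟩ : ∃ r ∈ R, r ∉ g.keys := by
      by_contra hc
      exact hall fun r hr => by_contra fun hk => hc ⟨r, hr, hk⟩
    refine ⟨r, hrR, ?_⟩
    rw [pv_P_eq_nil_of_not_key g r hrk]
    intro p hp
    cases hp

theorem pv_accA (fuel : Nat) : ∀ (d : PySem.Dict String (Int × List String))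
    (ready : List String) (b : List (List String)),
    pvRoundsA fuel d ready b = b ++ pvRoundsA fuel d ready [] := by
  induction fuel with
  | zero => intro d ready b; simp [pvRoundsA]
  | succ f ih =>
    intro d ready b
    by_cases hr : ready.isEmpty = true
    · simp [pvRoundsA, hr]
    · simp only [pvRoundsA, hr, Bool.false_eq_true, if_false]
      rw [ih _ _ (b ++ _), ih _ _ ([] ++ _)]
      simp [List.append_assoc]

theorem pv_accB (g : PySem.Dict String (List String)) (hwf : pvWF g) (fuel : Nat) :
    ∀ (R : List String) (b : List (List String)), R.Nodup →
    pvRoundsB fuel g R b = b ++ pvRoundsB fuel g R [] := by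
  induction fuel with
  | zero => intro R b h; simp [pvRoundsB]
  | succ f ih =>
    intro R b hR
    by_cases hr : R.isEmpty = true
    · simp [pvRoundsB, hr]
    · have hRne : R ≠ [] := fun h => by simp [h] at hr
      obtain ⟨n, hnR, hnp⟩ := pv_front_nonempty g hwf R hRne
      have hmemf : n ∈ R.filter (fun n => PySem.Set.isdisjoint R (g.getD n [])) :=
        List.mem_filter.2 ⟨hnR, (PySem.Set.isdisjoint_iff _ _).2
          (fun x hx hxP => hnp x hxP hx)⟩
      have hfne : (PySem.List.sorted (R.filter (fun n => PySem.Set.isdisjoint R (g.getD n [])))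
          (fun x => x) false) ≠ [] := by
        intro h
        rw [PySem.List.sorted_eq_nil_iff] at h
        rw [h] at hmemf
        cases hmemf
      have hfe : (PySem.List.sorted (R.filter (fun n => PySem.Set.isdisjoint R (g.getD n [])))
          (fun x => x) false).isEmpty = false := by
        cases hc : (PySem.List.sorted (R.filter (fun n => PySem.Set.isdisjoint R (g.getD n [])))
            (fun x => x) false).isEmpty
        · rfl
        · exact absurd (List.isEmpty_iff.1 hc) hfne
      simp only [pvRoundsB, hr, Bool.false_eq_true, if_false, hfe]
      rw [ih _ (b ++ _) (PySem.Set.nodup_diff _ _ hR), ih _ ([] ++ _) (PySem.Set.nodup_diff _ _ hR)]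
      simp [List.append_assoc]

-- the bisimulation: graphlib's counter machine against B's filtering loop
theorem pv_core (g : PySem.Dict String (List String)) (hgk : g.keys.Nodup)
    (hPnd : ∀ q, (pvP g q).Nodup) (hwf : pvWF g) :
    ∀ (fa : Nat) (fb : Nat) (R : List String) (d : PySem.Dict String (Int × List String))
      (ready : List String),
    R.Nodup →
    (∀ q, q ∉ R → ∀ p ∈ pvP g q, p ∉ R) →
    (∀ q, d.getD q ((0:Int), ([]:List String)) = (pvCnt g R q, pvSucc g q)) →
    ready.Nodup →
    (∀ q, q ∈ ready ↔ q ∈ R ∧ ∀ p ∈ pvP g q, p ∉ R) →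
    R.length < fa → R.length < fb →
    pvRoundsA fa d ready [] = pvRoundsB fb g R [] := by
  intro fa
  induction fa with
  | zero =>
    intro fb R d ready hR hclosed hd hreadynd hready hfa hfb
    omega
  | succ fa ih =>
    intro fb R d ready hR hclosed hd hreadynd hready hfa hfb
    cases fb with
    | zero => omega
    | succ fb =>
      by_cases hRe : R = []
      · subst hRe
        have hre : ready = [] := by
          refine List.eq_nil_iff_forall_not_mem.2 fun q hq => ?_
          have := ((hready q).1 hq).1
          cases this
        subst hre
        simp [pvRoundsA, pvRoundsB]
      · -- the pending set is nonempty: one round on each side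
        obtain ⟨n0, hn0R, hn0p⟩ := pv_front_nonempty g hwf R hRe
        have hn0ready : n0 ∈ ready := (hready n0).2 ⟨hn0R, hn0p⟩
        have hreadyne : ready ≠ [] := List.ne_nil_of_mem hn0ready
        have hreadyE : ready.isEmpty = false := by
          cases hc : ready.isEmpty
          · rfl
          · exact absurd (List.isEmpty_iff.1 hc) hreadyne
        have hRE : R.isEmpty = false := by
          cases hc : R.isEmpty
          · rfl
          · exact absurd (List.isEmpty_iff.1 hc) hRe
        -- the two emitted batches coincide
        have hfilnd : (R.filter (fun n => PySem.Set.isdisjoint R (g.getD n []))).Nodup :=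
          hR.filter _
        have hcharF : ∀ q, q ∈ ready ↔ q ∈ R.filter (fun n => PySem.Set.isdisjoint R (g.getD n [])) := by
          intro q
          rw [hready q, List.mem_filter]
          constructor
          · rintro ⟨h1, h2⟩
            exact ⟨h1, (PySem.Set.isdisjoint_iff _ _).2 fun x hx hxP => h2 x hxP hx⟩
          · rintro ⟨h1, h2⟩
            exact ⟨h1, fun p hp hpR => (PySem.Set.isdisjoint_iff _ _).1 h2 p hpR hp⟩
        have hperm : ready.Perm (R.filter (fun n => PySem.Set.isdisjoint R (g.getD n []))) :=
          (List.perm_ext_iff_of_nodup hreadynd hfilnd).2 hcharF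
        have hbeq : PySem.List.sorted ready (fun x => x) false
            = PySem.List.sorted (R.filter (fun n => PySem.Set.isdisjoint R (g.getD n []))) (fun x => x) false :=
          PySem.List.sorted_eq_sorted_of_perm _ _ _ (fun _ _ h => h) hperm
        have hbatchmem : ∀ q, q ∈ PySem.List.sorted ready (fun x => x) false ↔ q ∈ ready :=
          fun q => PySem.List.mem_sorted _ _ _ q
        have hbatchnd : (PySem.List.sorted ready (fun x => x) false).Nodup :=
          ((PySem.List.sorted_perm ready (fun x => x) false).nodup_iff).2 hreadynd
        have hbatchne : PySem.List.sorted ready (fun x => x) false ≠ [] := by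
          intro h
          rw [PySem.List.sorted_eq_nil_iff] at h
          exact hreadyne h
        have hfrontE : (PySem.List.sorted (R.filter (fun n => PySem.Set.isdisjoint R (g.getD n [])))
            (fun x => x) false).isEmpty = false := by
          cases hc : (PySem.List.sorted (R.filter (fun n => PySem.Set.isdisjoint R (g.getD n [])))
              (fun x => x) false).isEmpty
          · rfl
          · exact absurd (List.isEmpty_iff.1 hc) (hbeq ▸ hbatchne)
        have hbatchchar : ∀ q, q ∈ PySem.List.sorted ready (fun x => x) false
            ↔ q ∈ R ∧ ∀ p ∈ pvP g q, p ∉ R := by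
          intro q
          rw [hbatchmem q]
          exact hready q
        -- run the batch fold
        have hRfil : R.filter (fun x => decide (x ∉ ([] : List String))) = R := by simp
        have hbf := pv_batch_fold g R (PySem.List.sorted ready (fun x => x) false)
          hgk hPnd hR hclosed hbatchnd hbatchchar
          (PySem.List.sorted ready (fun x => x) false) [] d []
          (by simp)
          (by intro q; rw [hRfil]; exact hd q)
          List.nodup_nil
          (by
            intro q
            simp only [List.not_mem_nil, false_iff]
            rintro ⟨h1, h2, h3⟩
            exact h2 ((hbatchchar q).2 ⟨h1, fun p hp hpR => absurd (h3 p hp hpR) (by simp)⟩))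
        obtain ⟨hst1, hst2, hst3⟩ := hbf
        -- membership translation to the new pending set
        have hdiffmem : ∀ x, x ∈ PySem.Set.diff R (PySem.List.sorted ready (fun x => x) false)
            ↔ x ∈ R ∧ x ∉ PySem.List.sorted ready (fun x => x) false :=
          fun x => PySem.Set.mem_diff _ _ x
        have hfilmem : ∀ x, x ∈ R.filter (fun x => decide (x ∉ PySem.List.sorted ready (fun x => x) false))
            ↔ x ∈ R ∧ x ∉ PySem.List.sorted ready (fun x => x) false := by
          intro x
          rw [List.mem_filter]
          simp
        have hcntR' : ∀ q, pvCnt g (R.filter (fun x => decide (x ∉ PySem.List.sorted ready (fun x => x) false))) q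
            = pvCnt g (PySem.Set.diff R (PySem.List.sorted ready (fun x => x) false)) q := by
          intro q
          unfold pvCnt
          congr 1
          refine congrArg _ (List.filter_congr fun p _ => ?_)
          simp only [decide_eq_decide]
          rw [hfilmem p, hdiffmem p]
        -- new invariants
        have hR' : (PySem.Set.diff R (PySem.List.sorted ready (fun x => x) false)).Nodup :=
          PySem.Set.nodup_diff _ _ hR
        have hclosed' : ∀ q, q ∉ PySem.Set.diff R (PySem.List.sorted ready (fun x => x) false) →
            ∀ p ∈ pvP g q, p ∉ PySem.Set.diff R (PySem.List.sorted ready (fun x => x) false) := by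
          intro q hq p hp hpd
          have hpR : p ∈ R := ((hdiffmem p).1 hpd).1
          have hpb : p ∉ PySem.List.sorted ready (fun x => x) false := ((hdiffmem p).1 hpd).2
          by_cases hqR : q ∈ R
          · have hqb : q ∈ PySem.List.sorted ready (fun x => x) false := by
              by_contra hqb
              exact hq ((hdiffmem q).2 ⟨hqR, hqb⟩)
            exact ((hbatchchar q).1 hqb).2 p hp hpR
          · exact hclosed q hqR p hp hpR
        have hd' : ∀ q, ((PySem.List.sorted ready (fun x => x) false).foldl pvDone1 (d, [])).1.getD q ((0:Int), ([]:List String))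
            = (pvCnt g (PySem.Set.diff R (PySem.List.sorted ready (fun x => x) false)) q, pvSucc g q) := by
          intro q
          rw [hst1 q, hcntR' q]
        have hready' : ∀ q, q ∈ ((PySem.List.sorted ready (fun x => x) false).foldl pvDone1 (d, [])).2
            ↔ q ∈ PySem.Set.diff R (PySem.List.sorted ready (fun x => x) false)
              ∧ ∀ p ∈ pvP g q, p ∉ PySem.Set.diff R (PySem.List.sorted ready (fun x => x) false) := by
          intro q
          rw [hst3 q]
          constructor
          · rintro ⟨h1, h2, h3⟩
            refine ⟨(hdiffmem q).2 ⟨h1, h2⟩, fun p hp hpd => ?_⟩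
            have hpR : p ∈ R := ((hdiffmem p).1 hpd).1
            exact ((hdiffmem p).1 hpd).2 (h3 p hp hpR)
          · rintro ⟨h1, h2⟩
            refine ⟨((hdiffmem q).1 h1).1, ((hdiffmem q).1 h1).2, fun p hp hpR => ?_⟩
            by_contra hpb
            exact h2 p hp ((hdiffmem p).2 ⟨hpR, hpb⟩)
        -- the pending set strictly shrinks
        have hlen : (PySem.Set.diff R (PySem.List.sorted ready (fun x => x) false)).length < R.length := by
          have hn0b : n0 ∈ PySem.List.sorted ready (fun x => x) false := (hbatchmem n0).2 hn0ready
          refine pv_filter_len_lt R _ n0 hn0R ?_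
          simp [hn0b]
        -- step both loops and conclude with the induction hypothesis
        have hstepA : pvRoundsA (fa + 1) d ready []
            = [PySem.List.sorted ready (fun x => x) false]
              ++ pvRoundsA fa ((PySem.List.sorted ready (fun x => x) false).foldl pvDone1 (d, [])).1
                ((PySem.List.sorted ready (fun x => x) false).foldl pvDone1 (d, [])).2 [] := by
          simp only [pvRoundsA, hreadyE, Bool.false_eq_true, if_false]
          rw [pv_accA]
          simp
        have hstepB : pvRoundsB (fb + 1) g R []
            = [PySem.List.sorted ready (fun x => x) false]
              ++ pvRoundsB fb g (PySem.Set.diff R (PySem.List.sorted ready (fun x => x) false)) [] := by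
          simp only [pvRoundsB, hRE, Bool.false_eq_true, if_false, hfrontE]
          rw [← hbeq]
          rw [pv_accB g hwf fb _ _ hR']
          simp
        rw [hstepA, hstepB]
        congr 1
        exact ih fb _ _ _ hR' hclosed' hd' hst2 hready' (by omega) (by omega)

-- ===== VERDICT (by name: the statement is the Claim_ definition above) =====
theorem compute_insertion_order_py_spec : Claim_equal_compute_insertion_order_py := by
  intro deps hdom hpre
  unfold Spec_compute_insertion_order_py
  simp only [compute_insertion_order_py, compute_insertion_order_py_alt]
  have hgk := pv_graph_keys_nodup deps
  have hvnd := pv_graph_vals_nodup deps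
  have hPnd := pv_P_nodup deps
  have hwf : pvWF (pvGraph deps) := hpre
  set g := pvGraph deps with hgdef
  set info := pvBuildA g with hinfodef
  set R0 := g.values.foldl (fun s ps => PySem.Set.union s ps) (PySem.Set.ofList g.keys) with hR0def
  set ready0 := (info.items.filter (fun kv => kv.2.1 == 0)).map (fun kv => kv.1) with hready0def
  have hbknd : info.keys.Nodup := pv_build_keys_nodup g
  have hR0nd : R0.Nodup := pv_R0_nodup g
  have hclosed0 : ∀ q, q ∉ R0 → ∀ p ∈ pvP g q, p ∉ R0 := by
    intro q hq p hp hpR0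
    exact hq ((pv_R0_mem g q).2 (Or.inl (pv_P_mem_key g q (List.ne_nil_of_mem hp)).1))
  have hd0 : ∀ q, info.getD q ((0:Int), ([]:List String)) = (pvCnt g R0 q, pvSucc g q) := by
    intro q
    rw [pv_build_getD g hgk hvnd q]
    have hfil : (pvP g q).filter (fun p => decide (p ∈ R0)) = pvP g q :=
      List.filter_eq_self.2 fun p hp => by
        simp only [decide_eq_true_eq]
        exact (pv_R0_mem g p).2 (Or.inr (pv_P_sub_nodes g q p hp))
    unfold pvCnt
    rw [hfil]
  have hready0nd : ready0.Nodup := pv_ready0_nodup info _ hbknd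
  have hready0char : ∀ q, q ∈ ready0 ↔ q ∈ R0 ∧ ∀ p ∈ pvP g q, p ∉ R0 := by
    intro q
    rw [hready0def, pv_ready0_mem info hbknd q]
    have hmemiff : q ∈ info.keys ↔ q ∈ R0 :=
      (pv_build_mem_keys g q).trans (pv_R0_mem g q).symm
    have hcnt0 : (info.getD q ((0:Int), ([]:List String))).1 = 0 ↔ ∀ p ∈ pvP g q, p ∉ R0 := by
      rw [pv_build_getD g hgk hvnd q]
      simp only [Int.natCast_eq_zero, List.length_eq_zero_iff]
      constructor
      · intro h p hp
        rw [h] at hp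
        cases hp
      · intro h
        by_contra hne
        obtain ⟨p, hp⟩ := List.exists_mem_of_ne_nil _ hne
        exact h p hp ((pv_R0_mem g p).2 (Or.inr (pv_P_sub_nodes g q p hp)))
    rw [hmemiff, hcnt0]
  have hlenkeys : R0.length = info.keys.length :=
    List.Perm.length_eq ((List.perm_ext_iff_of_nodup hR0nd hbknd).2
      (fun q => (pv_R0_mem g q).trans (pv_build_mem_keys g q).symm))
  have hsz : info.keys.length = PySem.Dict.size info := by
    simp [PySem.Dict.size, PySem.Dict.keys]
  exact pv_core g hgk hPnd hwf (PySem.Dict.size info + 1) (R0.length + 1) R0 info ready0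
    hR0nd hclosed0 hd0 hready0nd hready0char (by omega) (by omega)
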